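/-
  jsmn_s.bin (-DJSMN_STRICT -DJSMN_PARENT_LINKS): EVERY FUNCTION COMPUTES THE PURE MODEL — the closed statements.

      jsmn_alloc_token, jsmn_fill_token   alloc_spec, fill_spec   Prog/Jsmn/S/Alloc.lean          21 instructions
      jsmn_parse_primitive                prim_spec               Prog/Jsmn/S/Prim.lean           70
      jsmn_parse_string                   str_spec                Prog/Jsmn/S/Str.lean           111
      jsmn_parse                          the prologue, the loop head with its 50-entry JUMP TABLE, pos++, ':', the epilogue and the composition (S/ParseEntry,
                                          ParseHead, Parse); open_spec string_spec primitive_spec (S/ParseOpen, ParseStr, ParsePrim: with the strict checks and the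
                                          parent link); close_spec (the walk up the parent links), comma_spec, final_spec (S/ParseClose, ParseComma, ParseFinal)    248
      jsmn_init, jsmn_run, jsmn_main      init_spec, run_spec, main_spec                           4 + 23 + 14
  all 491 instructions of the eight functions.
-/
import Prog.Jsmn.S.Assemble
import Prog.Jsmn.S.Alloc
import Prog.Jsmn.S.Prim
import Prog.Jsmn.S.Str
import Prog.Jsmn.S.Parse
import Prog.Jsmn.S.ParseOpen
import Prog.Jsmn.S.ParseStr
import Prog.Jsmn.S.ParsePrim
import Prog.Jsmn.S.ParseClose
import Prog.Jsmn.S.ParseComma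
import Prog.Jsmn.S.ParseFinal

namespace X86
namespace J6
namespace S
open X86.User (CodeAt RegsKept Span FlagsOK Layout toNat_add_ofNat toNat_ofNat_lt' add_ofNat_add)
open Jsmn

/-- Every field of `Pending` is a theorem. -/
theorem pending (n : User.Layout) : Pending n :=
  ⟨alloc_spec n, fill_spec n, fun ha hf => prim_spec ha hf, fun ha hf => str_spec ha hf,
   fun sf ha hs hp => parse_spec sf (open_spec sf ha) (string_spec sf hs) (primitive_spec sf hp) (close_spec sf n) (comma_spec sf n) (final_spec n)⟩

/-- jsmn_parse_primitive of jsmn_s.bin computes `Jsmn.parsePrimitive`. -/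
theorem prim_closed (n : User.Layout) : PrimSpec binS n := prim_of (pending n)
/-- jsmn_parse_string of jsmn_s.bin computes `Jsmn.parseString`. -/
theorem str_closed (n : User.Layout) : StrSpec binS n := str_of (pending n)
/-- **jsmn_parse of jsmn_s.bin computes `Jsmn.parseFuel`** (strict, with parent links): under `Inv` and the layout hypotheses of `ScanPre`; `ScanPost` as for
the default build, with a 96-byte stack window and 20-byte tokens. -/
theorem parse_closed (n : User.Layout) : ParseSpec binS n := parse_of (pending n)
/-- jsmn_run of jsmn_s.bin: jsmn_init, then jsmn_parse. -/
theorem run_closed (n : User.Layout) : RunSpec binS n := run_of (pending n)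
/-- jsmn_main of jsmn_s.bin leaves `encodeResult r tokens` at `out` and returns its length. -/
theorem main_closed (n : User.Layout) : MainSpec binS n := main_of (pending n)

end S
end J6
end X86

#print axioms X86.J6.S.main_closed
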